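-- pv_equiv track=rewrite | github.com/alxfnd/Advent | 22/Day14.py | GridID
-- ===== SOURCE A (Python) =====
-- def GridID(GridList: list, fromx, fromy, tox, toy):
--     newlist = []
--     newx: int
--     newy: int
--     if tox > fromx:
--         newx = fromx
--         newy = fromy
--         while tox > newx:
--             newx += 1
--             string = (f"{newx},{newy}")
--             newlist.append(string)
--     elif tox < fromx:
--         newx = fromx
--         newy = fromy
--         while tox < newx:
--             newx -= 1
--             string = (f"{newx},{newy}")
--             newlist.append(string)
--     elif toy > fromy:
--         newx = fromx
--         newy = fromy
--         while toy > newy: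
--             newy = newy + 1
--             string = (f"{newx},{newy}")
--             newlist.append(string)
--     elif toy < fromy:
--         newx = fromx
--         newy = fromy
--         while toy < newy:
--             newy -= 1
--             string = (f"new")
--             newlist.append(string)
--     return newlist
-- ===== SOURCE B (Python) =====
-- def _seg(src, dst, fmt):
--     # coordinate strings for the open-closed segment (src, dst], by midpoint splitting
--     if src == dst:
--         return []
--     if dst - src == 1 or dst - src == -1:
--         return [fmt(dst)]
--     mid = (src + dst) // 2
--     return _seg(src, mid, fmt) + _seg(mid, dst, fmt)
--
-- def GridID(GridList: list, fromx, fromy, tox, toy):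
--     if tox != fromx:
--         return _seg(fromx, tox, lambda v: f"{v},{fromy}")
--     if toy != fromy:
--         return _seg(fromy, toy, lambda v: f"{fromx},{v}")
--     return []
-- ===== Notes on version B (the rewrite author's own statement) =====
-- stated objective: alternative
-- what changed: Replaced A's four directional cell-by-cell while-loops by a single divide-and-conquer helper that splits the segment at its floor midpoint and concatenates the two halves' coordinate strings; B also emits coordinate strings on the -y branch where A appends the literal 'new'.
-- intended difference: On vertical segments going down (tox == fromx and toy < fromy) A returns a list of copies of the literal string 'new' (an f-string slip), while B returns the coordinate strings 'fromx,y' for each step, the intended value for a coordinate-path builder. — e.g. on GridID([], 0, 1, 0, 0): A returns ["new"], B returns ["0,0"]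
import Mathlib
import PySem

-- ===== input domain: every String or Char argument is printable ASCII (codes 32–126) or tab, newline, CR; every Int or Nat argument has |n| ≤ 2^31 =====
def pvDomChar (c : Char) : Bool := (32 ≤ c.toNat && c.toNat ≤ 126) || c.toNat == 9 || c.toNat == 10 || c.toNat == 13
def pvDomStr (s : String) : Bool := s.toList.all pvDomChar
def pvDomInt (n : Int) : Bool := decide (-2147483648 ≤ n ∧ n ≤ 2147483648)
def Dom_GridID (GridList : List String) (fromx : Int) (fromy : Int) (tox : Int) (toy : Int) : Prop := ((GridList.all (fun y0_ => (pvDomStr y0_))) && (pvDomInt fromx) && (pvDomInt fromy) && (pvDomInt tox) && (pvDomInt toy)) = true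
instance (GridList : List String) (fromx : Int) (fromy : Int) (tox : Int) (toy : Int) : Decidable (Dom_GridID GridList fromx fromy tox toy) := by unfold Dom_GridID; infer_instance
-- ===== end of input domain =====

-- B replaces A's four directional cell-by-cell while-loops by one divide-and-conquer helper
-- splitting the segment at its floor midpoint (alternative decomposition); on the -y branch A
-- appends the literal string "new" (an evident f-string slip) while B emits the coordinate
-- strings, stated below as the intended difference D_GridID.

-- ===== PORT A =====
-- while tox > newx: newx += 1; append f"{newx},{newy}"
def GridID_loopXup (tox newy newx : Int) : List String :=
  if tox > newx then
    (PySem.Int.toStr (newx + 1) ++ "," ++ PySem.Int.toStr newy) :: GridID_loopXup tox newy (newx + 1)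
  else []
termination_by (tox - newx).toNat
decreasing_by omega

-- while tox < newx: newx -= 1; append f"{newx},{newy}"
def GridID_loopXdown (tox newy newx : Int) : List String :=
  if tox < newx then
    (PySem.Int.toStr (newx - 1) ++ "," ++ PySem.Int.toStr newy) :: GridID_loopXdown tox newy (newx - 1)
  else []
termination_by (newx - tox).toNat
decreasing_by omega

-- while toy > newy: newy += 1; append f"{newx},{newy}"
def GridID_loopYup (toy newx newy : Int) : List String :=
  if toy > newy then
    (PySem.Int.toStr newx ++ "," ++ PySem.Int.toStr (newy + 1)) :: GridID_loopYup toy newx (newy + 1)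
  else []
termination_by (toy - newy).toNat
decreasing_by omega

-- while toy < newy: newy -= 1; append "new"
def GridID_loopYdown (toy newy : Int) : List String :=
  if toy < newy then "new" :: GridID_loopYdown toy (newy - 1)
  else []
termination_by (newy - toy).toNat
decreasing_by omega

def GridID (GridList : List String) (fromx : Int) (fromy : Int) (tox : Int) (toy : Int) : List String :=
  if tox > fromx then GridID_loopXup tox fromy fromx
  else if tox < fromx then GridID_loopXdown tox fromy fromx
  else if toy > fromy then GridID_loopYup toy fromx fromy
  else if toy < fromy then GridID_loopYdown toy fromy
  else []

-- ===== PORT B =====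
-- _seg(src, dst, fmt): strings of the open-closed segment (src, dst] by midpoint splitting
def GridID_seg (src dst : Int) (fmt : Int → String) : List String :=
  if src = dst then []
  else if dst - src = 1 ∨ dst - src = -1 then [fmt dst]
  else
    GridID_seg src (PySem.Int.floordiv (src + dst) 2) fmt ++
    GridID_seg (PySem.Int.floordiv (src + dst) 2) dst fmt
termination_by (dst - src).natAbs
decreasing_by
  all_goals rw [PySem.Int.floordiv_eq_ediv_of_pos (by norm_num)]
  all_goals omega

def GridID_alt (GridList : List String) (fromx : Int) (fromy : Int) (tox : Int) (toy : Int) : List String :=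
  if tox ≠ fromx then
    GridID_seg fromx tox (fun v => PySem.Int.toStr v ++ "," ++ PySem.Int.toStr fromy)
  else if toy ≠ fromy then
    GridID_seg fromy toy (fun v => PySem.Int.toStr fromx ++ "," ++ PySem.Int.toStr v)
  else []

-- ===== PRECONDITION & SPEC =====
-- On vertical segments going in the -y direction (tox = fromx, toy < fromy) A returns a list of
-- copies of the literal string "new" (an f-string slip), while B returns the coordinate strings
-- "fromx,y" for each step, which is the intended value for a coordinate-path builder.
def D_GridID (GridList : List String) (fromx : Int) (fromy : Int) (tox : Int) (toy : Int) : Prop :=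
  tox = fromx ∧ toy < fromy
instance (GridList : List String) (fromx : Int) (fromy : Int) (tox : Int) (toy : Int) : Decidable (D_GridID GridList fromx fromy tox toy) := by unfold D_GridID; infer_instance

def Spec_GridID (GridList : List String) (fromx : Int) (fromy : Int) (tox : Int) (toy : Int) (out : List String) : Prop := ¬ D_GridID GridList fromx fromy tox toy → out = GridID_alt GridList fromx fromy tox toy
instance (GridList : List String) (fromx : Int) (fromy : Int) (tox : Int) (toy : Int) (out : List String) : Decidable (Spec_GridID GridList fromx fromy tox toy out) := by unfold Spec_GridID; infer_instance

def pvDiffWitness_GridID : List String × Int × Int × Int × Int := ([], 0, 1, 0, 0)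
def pvDiffWitnessOut_GridID : (List String) × (List String) := (["new"], ["0,0"])

-- ===== CLAIM (what is proved, stated in full; the proofs are below) =====
def Claim_unchanged_GridID : Prop := ∀ (GridList : List String) (fromx : Int) (fromy : Int) (tox : Int) (toy : Int), Dom_GridID GridList fromx fromy tox toy → Spec_GridID GridList fromx fromy tox toy (GridID GridList fromx fromy tox toy)
def Claim_changed_GridID : Prop := Dom_GridID (pvDiffWitness_GridID.1) (pvDiffWitness_GridID.2.1) (pvDiffWitness_GridID.2.2.1) (pvDiffWitness_GridID.2.2.2.1) (pvDiffWitness_GridID.2.2.2.2) ∧ D_GridID (pvDiffWitness_GridID.1) (pvDiffWitness_GridID.2.1) (pvDiffWitness_GridID.2.2.1) (pvDiffWitness_GridID.2.2.2.1) (pvDiffWitness_GridID.2.2.2.2) ∧ GridID (pvDiffWitness_GridID.1) (pvDiffWitness_GridID.2.1) (pvDiffWitness_GridID.2.2.1) (pvDiffWitness_GridID.2.2.2.1) (pvDiffWitness_GridID.2.2.2.2) = pvDiffWitnessOut_GridID.1 ∧ GridID_alt (pvDiffWitness_GridID.1) (pvDiffWitness_GridID.2.1) (pvDiffWitness_GridID.2.2.1)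 (pvDiffWitness_GridID.2.2.2.1) (pvDiffWitness_GridID.2.2.2.2) = pvDiffWitnessOut_GridID.2 ∧ pvDiffWitnessOut_GridID.1 ≠ pvDiffWitnessOut_GridID.2
def Claim_exact_GridID : Prop := ∀ (GridList : List String) (fromx : Int) (fromy : Int) (tox : Int) (toy : Int), Dom_GridID GridList fromx fromy tox toy → D_GridID GridList fromx fromy tox toy → GridID GridList fromx fromy tox toy ≠ GridID_alt GridList fromx fromy tox toy

-- ===== LEMMAS AND PROOFS =====

-- Splitting a descending range at an interior point.
theorem pyRange_neg_one_append (a m b : Int) (h1 : m ≤ a) (h2 : b ≤ m) :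
    PySem.List.pyRange a b (-1)
      = PySem.List.pyRange a m (-1) ++ PySem.List.pyRange m b (-1) := by
  rw [PySem.List.pyRange_neg_one_eq_reverse, PySem.List.pyRange_neg_one_eq_reverse,
      PySem.List.pyRange_neg_one_eq_reverse,
      PySem.List.pyRange_one_append (b + 1) (m + 1) (a + 1) (by omega) (by omega),
      List.reverse_append]

-- B's midpoint splitter on an ascending segment produces the ascending range of strings.
theorem seg_asc (fmt : Int → String) : ∀ n : Nat, ∀ src dst : Int, dst - src = (n : Int) →
    GridID_seg src dst fmt = (PySem.List.pyRange (src + 1) (dst + 1) 1).map fmt := by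
  intro n
  induction n using Nat.strong_induction_on with
  | _ n ih =>
    intro src dst h
    rw [GridID_seg]
    by_cases h0 : src = dst
    · rw [if_pos h0, PySem.List.pyRange_one_eq_nil (by omega)]; simp
    · rw [if_neg h0]
      by_cases h1 : dst - src = 1 ∨ dst - src = -1
      · rw [if_pos h1]
        have hd : dst = src + 1 := by omega
        subst hd
        rw [show src + 1 + 1 = (src + 1) + 1 from rfl, PySem.List.pyRange_one_succ_right (by omega),
            PySem.List.pyRange_one_eq_nil (by omega)]
        simp
      · rw [if_neg h1]
        have hm : PySem.Int.floordiv (src + dst) 2 = (src + dst) / 2 :=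
          PySem.Int.floordiv_eq_ediv_of_pos (by norm_num)
        rw [hm]
        have hb : src + 1 ≤ (src + dst) / 2 ∧ (src + dst) / 2 ≤ dst - 1 := by omega
        rw [ih ((src + dst) / 2 - src).toNat (by omega) src ((src + dst) / 2) (by omega),
            ih (dst - (src + dst) / 2).toNat (by omega) ((src + dst) / 2) dst (by omega),
            ← List.map_append,
            ← PySem.List.pyRange_one_append (src + 1) ((src + dst) / 2 + 1) (dst + 1)
                (by omega) (by omega)]

-- B's midpoint splitter on a descending segment produces the descending range of strings.
theorem seg_desc (fmt : Int → String) : ∀ n : Nat, ∀ src dst : Int, src - dst = (n : Int) →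
    GridID_seg src dst fmt = (PySem.List.pyRange (src - 1) (dst - 1) (-1)).map fmt := by
  intro n
  induction n using Nat.strong_induction_on with
  | _ n ih =>
    intro src dst h
    rw [GridID_seg]
    by_cases h0 : src = dst
    · rw [if_pos h0, PySem.List.pyRange_neg_one_eq_nil (by omega)]; simp
    · rw [if_neg h0]
      by_cases h1 : dst - src = 1 ∨ dst - src = -1
      · rw [if_pos h1]
        have hd : dst = src - 1 := by omega
        subst hd
        rw [PySem.List.pyRange_neg_one_cons (by omega),
            PySem.List.pyRange_neg_one_eq_nil (by omega)]
        simp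
      · rw [if_neg h1]
        have hm : PySem.Int.floordiv (src + dst) 2 = (src + dst) / 2 :=
          PySem.Int.floordiv_eq_ediv_of_pos (by norm_num)
        rw [hm]
        have hb : dst + 1 ≤ (src + dst) / 2 ∧ (src + dst) / 2 ≤ src - 1 := by omega
        rw [ih (src - (src + dst) / 2).toNat (by omega) src ((src + dst) / 2) (by omega),
            ih ((src + dst) / 2 - dst).toNat (by omega) ((src + dst) / 2) dst (by omega),
            ← List.map_append,
            ← pyRange_neg_one_append (src - 1) ((src + dst) / 2 - 1) (dst - 1)
                (by omega) (by omega)]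

-- A's x-increasing while-loop equals the same ascending range of strings.
theorem loopXup_eq (tox newy : Int) : ∀ newx : Int,
    GridID_loopXup tox newy newx
      = (PySem.List.pyRange (newx + 1) (tox + 1) 1).map
          (fun x => PySem.Int.toStr x ++ "," ++ PySem.Int.toStr newy) := by
  have key : ∀ n : Nat, ∀ newx : Int, (tox - newx).toNat = n →
      GridID_loopXup tox newy newx
        = (PySem.List.pyRange (newx + 1) (tox + 1) 1).map
            (fun x => PySem.Int.toStr x ++ "," ++ PySem.Int.toStr newy) := by
    intro n
    induction n with
    | zero =>
      intro newx h
      rw [GridID_loopXup, PySem.List.pyRange_one_eq_nil (by omega)]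
      simp [show ¬ tox > newx by omega]
    | succ n ih =>
      intro newx h
      rw [GridID_loopXup, PySem.List.pyRange_one_cons (by omega)]
      simp only [show tox > newx by omega, if_pos]
      rw [ih (newx + 1) (by omega)]
      simp
  intro newx; exact key (tox - newx).toNat newx rfl

-- A's x-decreasing while-loop equals the same descending range of strings.
theorem loopXdown_eq (tox newy : Int) : ∀ newx : Int,
    GridID_loopXdown tox newy newx
      = (PySem.List.pyRange (newx - 1) (tox - 1) (-1)).map
          (fun x => PySem.Int.toStr x ++ "," ++ PySem.Int.toStr newy) := by
  have key : ∀ n : Nat, ∀ newx : Int, (newx - tox).toNat = n →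
      GridID_loopXdown tox newy newx
        = (PySem.List.pyRange (newx - 1) (tox - 1) (-1)).map
            (fun x => PySem.Int.toStr x ++ "," ++ PySem.Int.toStr newy) := by
    intro n
    induction n with
    | zero =>
      intro newx h
      rw [GridID_loopXdown, PySem.List.pyRange_neg_one_eq_nil (by omega)]
      simp [show ¬ tox < newx by omega]
    | succ n ih =>
      intro newx h
      rw [GridID_loopXdown, PySem.List.pyRange_neg_one_cons (by omega)]
      simp only [show tox < newx by omega, if_pos]
      rw [ih (newx - 1) (by omega)]
      simp
  intro newx; exact key (newx - tox).toNat newx rfl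

-- A's y-increasing while-loop equals the same ascending range of strings.
theorem loopYup_eq (toy newx : Int) : ∀ newy : Int,
    GridID_loopYup toy newx newy
      = (PySem.List.pyRange (newy + 1) (toy + 1) 1).map
          (fun y => PySem.Int.toStr newx ++ "," ++ PySem.Int.toStr y) := by
  have key : ∀ n : Nat, ∀ newy : Int, (toy - newy).toNat = n →
      GridID_loopYup toy newx newy
        = (PySem.List.pyRange (newy + 1) (toy + 1) 1).map
            (fun y => PySem.Int.toStr newx ++ "," ++ PySem.Int.toStr y) := by
    intro n
    induction n with
    | zero =>
      intro newy h
      rw [GridID_loopYup, PySem.List.pyRange_one_eq_nil (by omega)]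
      simp [show ¬ toy > newy by omega]
    | succ n ih =>
      intro newy h
      rw [GridID_loopYup, PySem.List.pyRange_one_cons (by omega)]
      simp only [show toy > newy by omega, if_pos]
      rw [ih (newy + 1) (by omega)]
      simp
  intro newy; exact key (toy - newy).toNat newy rfl

-- The literal "new" is never a coordinate string (it has no comma).
theorem new_ne_coord (a b : Int) :
    ("new" : String) ≠ PySem.Int.toStr a ++ "," ++ PySem.Int.toStr b := by
  intro h
  have h2 : (("new" : String)).toList
      = (PySem.Int.toStr a ++ "," ++ PySem.Int.toStr b).toList := by rw [h]
  simp [String.toList_append] at h2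
  have hm : (',' : Char) ∈ (['n', 'e', 'w'] : List Char) := by rw [h2]; simp
  simp at hm

-- ===== VERDICT (by name: the statement is the Claim_ definition above) =====
theorem GridID_spec : Claim_unchanged_GridID := by
  intro GridList fromx fromy tox toy _ hnd
  show GridID GridList fromx fromy tox toy = GridID_alt GridList fromx fromy tox toy
  unfold GridID GridID_alt
  rcases lt_trichotomy fromx tox with hx | hx | hx
  · rw [seg_asc _ (tox - fromx).toNat fromx tox (by omega), loopXup_eq]
    simp [show tox > fromx from hx, show tox ≠ fromx by omega]
  · rcases lt_trichotomy fromy toy with hy | hy | hy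
    · rw [seg_asc _ (toy - fromy).toNat fromy toy (by omega), loopYup_eq]
      simp [hx, show toy > fromy from hy, show toy ≠ fromy by omega]
    · simp [hx, hy]
    · exact absurd ⟨hx.symm, hy⟩ hnd
  · rw [seg_desc _ (fromx - tox).toNat fromx tox (by omega), loopXdown_eq]
    simp [show ¬ tox > fromx by omega, show tox < fromx from hx, show tox ≠ fromx by omega]

theorem GridID_changed : Claim_changed_GridID := by
  unfold Claim_changed_GridID
  refine ⟨by decide, by decide, ?_, ?_, by decide⟩
  · show GridID [] 0 1 0 0 = ["new"]
    simp [GridID, GridID_loopYdown]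
  · show GridID_alt [] 0 1 0 0 = ["0,0"]
    rw [show GridID_alt [] 0 1 0 0
          = GridID_seg 1 0 (fun v => PySem.Int.toStr 0 ++ "," ++ PySem.Int.toStr v) by
        simp [GridID_alt],
      seg_desc _ 1 1 0 (by omega), PySem.List.pyRange_neg_one_cons (by omega),
      PySem.List.pyRange_neg_one_eq_nil (by omega)]
    decide

theorem GridID_tight : Claim_exact_GridID := by
  intro GridList fromx fromy tox toy _ hd heq
  obtain ⟨hx, hy⟩ := hd
  unfold GridID GridID_alt at heq
  rw [GridID_loopYdown, seg_desc _ (fromy - toy).toNat fromy toy (by omega)] at heq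
  simp only [show ¬ tox > fromx by omega, show ¬ tox < fromx by omega,
    show ¬ toy > fromy by omega, show toy < fromy from hy, if_pos, if_neg,
    not_false_eq_true, ite_false, show (tox ≠ fromx) = False by simp; omega,
    show (toy ≠ fromy) = True by simp; omega, ite_true] at heq
  rw [PySem.List.pyRange_neg_one_cons (by omega)] at heq
  simp only [List.map_cons, List.cons.injEq] at heq
  exact new_ne_coord fromx (fromy - 1) heq.1
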